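-- pv_equiv track=rewrite | github.com/jano31415/codejam | codeforces/edu_143/proba.py | solve
-- ===== SOURCE A (Python) =====
-- def solve(a,b,s1,s2):
--     s = s1 + s2[::-1]
--     tot=0
--     for i in range(len(s)-1):
--         if s[i] == s[i+1]:
--             tot+=1
--     if tot>1:
--         return "NO"
--     return "YES"
-- ===== SOURCE B (Python) =====
-- def solve(a, b, s1, s2):
--     def pairs(s):
--         return sum(1 for x, y in zip(s, s[1:]) if x == y)
--     tot = pairs(s1) + pairs(s2)
--     if s1 and s2 and s1[-1] == s2[-1]:
--         tot += 1
--     return "NO" if tot > 1 else "YES"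
-- ===== Notes on version B (the rewrite author's own statement) =====
-- stated objective: alternative
-- what changed: B never builds the concatenated string: it counts adjacent equal pairs in s1 and s2 separately via zip (reversal preserves the pair count) and adds a junction term for the boundary character pair, instead of A's index loop over s1 + s2[::-1].
import Mathlib
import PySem

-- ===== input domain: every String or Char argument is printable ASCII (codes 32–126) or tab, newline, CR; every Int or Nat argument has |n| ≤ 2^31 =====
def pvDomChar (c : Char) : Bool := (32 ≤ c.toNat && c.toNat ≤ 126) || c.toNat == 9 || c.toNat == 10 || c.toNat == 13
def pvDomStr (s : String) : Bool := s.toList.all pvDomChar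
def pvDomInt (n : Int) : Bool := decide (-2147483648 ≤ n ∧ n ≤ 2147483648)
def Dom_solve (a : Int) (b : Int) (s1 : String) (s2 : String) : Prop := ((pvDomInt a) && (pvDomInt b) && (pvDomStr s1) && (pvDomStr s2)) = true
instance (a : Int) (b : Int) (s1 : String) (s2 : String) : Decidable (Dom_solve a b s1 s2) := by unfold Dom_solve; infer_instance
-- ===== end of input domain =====

-- B avoids building the concatenated string: it counts adjacent equal pairs in s1 and in s2
-- separately and adds a junction term (same decomposition, same O(n) cost; objective: alternative).

-- ===== PORT A =====
-- s = s1 + s2[::-1]; loop i in range(len(s)-1); tot += 1 when s[i] == s[i+1]; "NO" iff tot > 1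
def solve (a : Int) (b : Int) (s1 : String) (s2 : String) : String :=
  let s : List Char := s1.toList ++ s2.toList.reverse
  let tot : Int :=
    (PySem.List.pyRange 0 ((s.length : Int) - 1) 1).foldl
      (fun tot i =>
        if PySem.List.pyGet? s i = PySem.List.pyGet? s (i + 1) then tot + 1 else tot) 0
  if tot > 1 then "NO" else "YES"

-- ===== PORT B =====
-- pairs(s) = sum(1 for x, y in zip(s, s[1:]) if x == y)
def pairsB (l : List Char) : Int :=
  ((l.zip l.tail).filter (fun p => p.1 = p.2)).length

def solve_alt (a : Int) (b : Int) (s1 : String) (s2 : String) : String :=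
  let tot : Int := pairsB s1.toList + pairsB s2.toList
  let tot : Int :=
    if s1.toList ≠ [] ∧ s2.toList ≠ [] ∧
        PySem.List.pyGet? s1.toList (-1) = PySem.List.pyGet? s2.toList (-1)
    then tot + 1 else tot
  if tot > 1 then "NO" else "YES"

-- ===== PRECONDITION & SPEC =====
def Spec_solve (a : Int) (b : Int) (s1 : String) (s2 : String) (out : String) : Prop := out = solve_alt a b s1 s2
instance (a : Int) (b : Int) (s1 : String) (s2 : String) (out : String) : Decidable (Spec_solve a b s1 s2 out) := by unfold Spec_solve; infer_instance

-- ===== CLAIM (what is proved, stated in full; the proofs are below) =====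
def Claim_equal_solve : Prop := ∀ (a : Int) (b : Int) (s1 : String) (s2 : String), Dom_solve a b s1 s2 → Spec_solve a b s1 s2 (solve a b s1 s2)

-- ===== LEMMAS AND PROOFS =====

-- canonical adjacent-equal-pair count
def cnt : List Char → Int
  | c :: d :: t => (if c = d then 1 else 0) + cnt (d :: t)
  | _ => 0

theorem cnt_cons (c : Char) (l : List Char) :
    cnt (c :: l) = (if l.head? = some c then 1 else 0) + cnt l := by
  cases l with
  | nil => simp [cnt]
  | cons d t =>
    simp only [cnt, List.head?_cons, Option.some.injEq]
    by_cases h : c = d <;> simp [h, eq_comm]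

theorem countP_range_pairs (l : List Char) :
    (((List.range (l.length - 1)).countP (fun k => decide (l[k]? = l[k+1]?)) : Nat) : Int)
      = cnt l := by
  induction l with
  | nil => simp [cnt]
  | cons c t ih =>
    cases t with
    | nil => simp [cnt]
    | cons d t' =>
      rw [show (c :: d :: t' : List Char).length - 1 = ((d :: t').length - 1) + 1 by
        simp]
      rw [List.range_succ_eq_map, List.countP_cons, List.countP_map]
      have hc : ∀ k ∈ List.range ((d :: t').length - 1),
          ((fun k => decide ((c :: d :: t' : List Char)[k]? = (c :: d :: t')[k+1]?)) ∘
            Nat.succ) k = true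
          ↔ (fun k => decide ((d :: t' : List Char)[k]? = (d :: t')[k+1]?)) k = true := by
        intro k _
        simp [Function.comp, Nat.succ_eq_add_one]
      rw [List.countP_congr hc]
      push_cast
      rw [ih]
      have h0 : (c :: d :: t' : List Char)[0]? = some c := rfl
      have h1 : (c :: d :: t' : List Char)[0+1]? = some d := rfl
      rw [h0, h1, cnt]
      by_cases h : c = d <;> simp [h] <;> omega

-- A's index loop equals cnt on the list
theorem loopA (l : List Char) :
    (PySem.List.pyRange 0 ((l.length : Int) - 1) 1).foldl
      (fun tot i =>
        if PySem.List.pyGet? l i = PySem.List.pyGet? l (i + 1) then tot + 1 else tot) (0 : Int)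
    = cnt l := by
  rw [PySem.List.foldl_ite_add_one, PySem.List.pyRange_one]
  simp only [List.countP_map, Int.sub_zero, zero_add]
  have hc : ∀ k ∈ List.range (((l.length : Int) - 1).toNat),
      ((fun i => decide (PySem.List.pyGet? l i = PySem.List.pyGet? l (i + 1))) ∘
        (fun k : Nat => (k : Int))) k = true ↔
      (fun k : Nat => decide (l[k]? = l[k+1]?)) k = true := by
    intro k _
    simp only [Function.comp]
    have h1 : (k : Int) + 1 = ((k + 1 : Nat) : Int) := by push_cast; ring
    simp only [h1, PySem.List.pyGet?_natCast]
  rw [List.countP_congr hc]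
  rw [show ((l.length : Int) - 1).toNat = l.length - 1 by omega]
  exact countP_range_pairs l

-- B's zip/filter count equals cnt
theorem pairsB_eq_cnt (l : List Char) : pairsB l = cnt l := by
  induction l with
  | nil => simp [pairsB, cnt]
  | cons c t ih =>
    cases t with
    | nil => simp [pairsB, cnt]
    | cons d t' =>
      simp only [pairsB, cnt, List.tail_cons, List.zip_cons_cons, List.filter_cons] at *
      by_cases h : c = d <;> simp [h] at * <;> omega

-- cnt splits over append with a junction term
theorem cnt_append (l1 l2 : List Char) :
    cnt (l1 ++ l2) = cnt l1 + cnt l2 +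
      (if l1 ≠ [] ∧ l2 ≠ [] ∧ l1.getLast? = l2.head? then 1 else 0) := by
  induction l1 with
  | nil => simp [cnt]
  | cons c t ih =>
    cases t with
    | nil =>
      cases l2 with
      | nil => simp [cnt]
      | cons d t2 =>
        simp only [List.singleton_append, cnt, List.getLast?_singleton,
          List.head?_cons, Option.some.injEq]
        by_cases h : c = d <;> simp [h, eq_comm] <;> omega
    | cons d t' =>
      simp only [List.cons_append, cnt] at *
      rw [ih, List.getLast?_cons_cons]
      simp only [ne_eq, List.cons_ne_nil, not_false_iff, true_and]
      split_ifs <;> omega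

-- reversing preserves the adjacent-pair count
theorem cnt_reverse (l : List Char) : cnt l.reverse = cnt l := by
  induction l with
  | nil => rfl
  | cons c t ih =>
    rw [List.reverse_cons, cnt_append, ih, List.getLast?_reverse,
      show cnt [c] = 0 from rfl, cnt_cons c t]
    cases t with
    | nil => simp
    | cons d t'' =>
      simp only [ne_eq, List.reverse_eq_nil_iff, List.cons_ne_nil, not_false_iff,
        true_and, List.head?_cons]
      split_ifs <;> omega

-- ===== VERDICT (by name: the statement is the Claim_ definition above) =====
theorem solve_spec : Claim_equal_solve := by
  intro a b s1 s2 _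
  unfold Spec_solve solve solve_alt
  simp only
  rw [loopA, cnt_append, cnt_reverse, pairsB_eq_cnt, pairsB_eq_cnt,
    PySem.List.pyGet?_neg_one, PySem.List.pyGet?_neg_one, List.head?_reverse]
  simp only [ne_eq, List.reverse_eq_nil_iff]
  split_ifs <;> first | rfl | omega
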